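-- pv_equiv track=rewrite | github.com/m-aouzal/dsomm | app/preprocessing/dsomm_tools.py | group_tools_by_parent
-- ===== SOURCE A (Python) =====
-- from collections import defaultdict
--
-- def group_tools_by_parent(tools_list, exempt_list):
--     """
--     Groups tools by their parent name (first word) unless they are in the exempt list.
--     """
--     grouped_tools = defaultdict(list)
--
--     for tool_name in tools_list:
--         if tool_name in exempt_list:
--             grouped_tools[tool_name].append(tool_name)
--         else:
--             parent = tool_name.split()[0]  # Use the first word as the parent
--             grouped_tools[parent].append(tool_name)
-- # Add git-commit-signing to specific tools
--     if "Git" in grouped_tools: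
--         grouped_tools["Git"].append("git-commit-signing")
--     if "GitHub" in grouped_tools:
--         grouped_tools["GitHub"].append("git-commit-signing")
--     if "GitLab" in grouped_tools:
--         grouped_tools["GitLab"].append("git-commit-signing")
--
--     # Ensure unique tools within each group
--     grouped_tools = {parent: sorted(set(tools)) for parent, tools in grouped_tools.items()}
--     return grouped_tools
-- ===== SOURCE B (Python) =====
-- def group_tools_by_parent(tools_list, exempt_list):
--     """
--     Groups tools by their parent name (first word) unless they are in the exempt list.
--     Sort-then-scan re-implementation: compute each tool's group key once, sort the
--     (tool, key) pairs by key, collect each group as one consecutive run of the sorted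
--     list, then emit the groups in first-occurrence order of their keys.
--     """
--     keys = [t if t in exempt_list else t.split()[0] for t in tools_list]
--     pairs = sorted(zip(tools_list, keys), key=lambda p: p[1])
--     groups = {}
--     i, n = 0, len(pairs)
--     while i < n:
--         k = pairs[i][1]
--         members = []
--         while i < n and pairs[i][1] == k:
--             members.append(pairs[i][0])
--             i += 1
--         groups[k] = members
--     result = {}
--     for k in dict.fromkeys(keys):
--         members = set(groups[k])
--         if k in ("Git", "GitHub", "GitLab"):
--             members.add("git-commit-signing")
--         result[k] = sorted(members)
--     return result
-- ===== Notes on version B (the rewrite author's own statement) =====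
-- stated objective: alternative
-- what changed: Replaces A's single-pass defaultdict accumulation plus post-hoc Git/GitHub/GitLab patching of the dict by a sort-then-scan grouping: each tool's key is computed once, the (tool, key) pairs are sorted by key, each group is collected as one consecutive run of the sorted list, and the groups are emitted in first-occurrence key order.
import Mathlib
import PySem

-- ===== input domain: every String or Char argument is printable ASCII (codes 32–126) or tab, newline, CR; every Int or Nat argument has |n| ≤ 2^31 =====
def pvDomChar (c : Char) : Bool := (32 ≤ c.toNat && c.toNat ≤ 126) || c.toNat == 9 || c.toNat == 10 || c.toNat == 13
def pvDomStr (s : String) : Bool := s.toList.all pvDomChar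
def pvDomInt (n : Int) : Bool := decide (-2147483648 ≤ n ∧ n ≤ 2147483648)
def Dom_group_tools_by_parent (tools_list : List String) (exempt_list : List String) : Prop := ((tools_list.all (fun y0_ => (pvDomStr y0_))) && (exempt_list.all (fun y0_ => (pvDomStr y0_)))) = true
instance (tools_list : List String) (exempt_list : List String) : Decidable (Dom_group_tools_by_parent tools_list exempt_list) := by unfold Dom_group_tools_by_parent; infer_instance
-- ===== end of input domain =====

-- B replaces A's defaultdict accumulation + post-patching + normalisation pass by a
-- sort-then-run-scan grouping over precomputed keys, emitted in first-occurrence key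
-- order (objective: alternative decomposition, same observable behaviour).

-- ===== PORT A =====
def group_tools_by_parent (tools_list : List String) (exempt_list : List String) : List (String × List String) :=
  let grouped := tools_list.foldl (fun d tool_name =>
    if tool_name ∈ exempt_list then
      d.modify tool_name [] (fun v => v ++ [tool_name])
    else
      d.modify ((PySem.Str.split₀ tool_name).headD "") [] (fun v => v ++ [tool_name]))
    (PySem.Dict.empty : PySem.Dict String (List String))
  let grouped := if grouped.contains "Git" then grouped.modify "Git" [] (fun v => v ++ ["git-commit-signing"]) else grouped
  let grouped := if grouped.contains "GitHub" then grouped.modify "GitHub" [] (fun v => v ++ ["git-commit-signing"]) else grouped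
  let grouped := if grouped.contains "GitLab" then grouped.modify "GitLab" [] (fun v => v ++ ["git-commit-signing"]) else grouped
  grouped.items.map (fun p => (p.1, PySem.List.sorted (PySem.Set.ofList p.2) (fun x => x) false))


-- ===== PORT B =====
-- key of one tool: the tool itself if exempt, else its first word (IndexError when empty — excluded by Pre_)
def pvKeyB (exempt_list : List String) (t : String) : String :=
  if t ∈ exempt_list then t else (PySem.Str.split₀ t).headD ""

-- the run-collecting while loop of B: one (key, members) pair per consecutive run of equal keys
def pvRuns : List (String × String) → List (String × List String)
  | [] => []
  | (t, k) :: rest =>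
      (k, t :: (rest.takeWhile (fun p => p.2 == k)).map (fun p => p.1))
        :: pvRuns (rest.dropWhile (fun p => p.2 == k))
  termination_by l => l.length
  decreasing_by
    simpa [Nat.lt_succ_iff] using List.length_dropWhile_le (fun p => p.2 == k) rest

def group_tools_by_parent_alt (tools_list : List String) (exempt_list : List String) : List (String × List String) :=
  let keys := tools_list.map (pvKeyB exempt_list)
  let pairs := PySem.List.sorted (tools_list.zip keys) (fun p => p.2) false
  let groups := (pvRuns pairs).foldl (fun d r => d.insert r.1 r.2)
    (PySem.Dict.empty : PySem.Dict String (List String))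
  (PySem.List.dedup keys).map (fun k =>
    let members : PySem.Set String := PySem.Set.ofList (groups.getD k [])
    let members := if k = "Git" ∨ k = "GitHub" ∨ k = "GitLab" then PySem.Set.add members "git-commit-signing" else members
    (k, PySem.List.sorted members (fun x => x) false))


-- ===== PRECONDITION & SPEC =====
-- Pre_ excludes exactly the inputs where Python A raises IndexError: a tool that is not
-- exempt and has no non-whitespace character (split() returns []).
def Pre_group_tools_by_parent (tools_list : List String) (exempt_list : List String) : Prop :=
  ∀ t ∈ tools_list, t ∈ exempt_list ∨ PySem.Str.split₀ t ≠ []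
instance (tools_list : List String) (exempt_list : List String) : Decidable (Pre_group_tools_by_parent tools_list exempt_list) := by unfold Pre_group_tools_by_parent; infer_instance

def pvWitness_group_tools_by_parent : List String × List String :=
  (["Git hook", "GitHub Actions", "SonarQube scan", "Git hook", "special tool"], ["special tool"])

def Spec_group_tools_by_parent (tools_list : List String) (exempt_list : List String) (out : List (String × List String)) : Prop := out = group_tools_by_parent_alt tools_list exempt_list
instance (tools_list : List String) (exempt_list : List String) (out : List (String × List String)) : Decidable (Spec_group_tools_by_parent tools_list exempt_list out) := by unfold Spec_group_tools_by_parent; infer_instance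

-- ===== CLAIM (what is proved, stated in full; the proofs are below) =====
def Claim_equal_group_tools_by_parent : Prop := ∀ (tools_list : List String) (exempt_list : List String), Dom_group_tools_by_parent tools_list exempt_list → Pre_group_tools_by_parent tools_list exempt_list → Spec_group_tools_by_parent tools_list exempt_list (group_tools_by_parent tools_list exempt_list)

-- ===== LEMMAS AND PROOFS =====

lemma git_step_keys (d : PySem.Dict String (List String)) (s : String) :
    (if d.contains s then d.modify s [] (fun v => v ++ ["git-commit-signing"]) else d).keys = d.keys := by
  by_cases h : d.contains s = true
  · rw [if_pos h, PySem.Dict.keys_modify]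
    exact PySem.Dict.keys_insert_of_contains _ _ h
  · rw [if_neg h]

lemma git_step_contains (d : PySem.Dict String (List String)) (s c : String) :
    (if d.contains s then d.modify s [] (fun v => v ++ ["git-commit-signing"]) else d).contains c = d.contains c := by
  conv_lhs => rw [PySem.Dict.contains_eq_decide_mem_keys]
  rw [git_step_keys, ← PySem.Dict.contains_eq_decide_mem_keys]

lemma git_step_getD (d : PySem.Dict String (List String)) (s c : String) :
    (if d.contains s then d.modify s [] (fun v => v ++ ["git-commit-signing"]) else d).getD c []
      = if c = s ∧ d.contains s = true then d.getD c [] ++ ["git-commit-signing"] else d.getD c [] := by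
  by_cases h : d.contains s = true
  · rw [if_pos h, PySem.Dict.getD_modify]
    by_cases hc : c = s
    · subst hc; simp [h]
    · simp [hc]
  · simp [h]

-- stability of the insertion sort w.r.t. one key value
lemma filter_insertBy_key {α : Type} (f : α → String) (k : String) (x : α) (ys : List α)
    (hys : ys.Pairwise (fun a b => f a ≤ f b)) :
    (PySem.List.insertBy (fun a b => decide (f a < f b)) x ys).filter (fun y => f y == k)
      = if f x == k then ys.filter (fun y => f y == k) ++ [x]
        else ys.filter (fun y => f y == k) := by
  induction ys with
  | nil => simp only [PySem.List.insertBy]; split <;> simp_all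
  | cons y ys ih =>
    rw [PySem.List.insertBy]
    by_cases hlt : f x < f y
    · rw [if_pos (by simpa using hlt)]
      by_cases hxk : f x == k
      · have hk : f x = k := by simpa using hxk
        have hnil : (y :: ys).filter (fun y => f y == k) = [] := by
          rw [List.filter_eq_nil_iff]
          intro z hz
          have hyz : f y ≤ f z := by
            rcases List.mem_cons.mp hz with rfl | hz
            · exact le_refl _
            · exact (List.pairwise_cons.mp hys).1 z hz
          have : k < f z := lt_of_lt_of_le (hk ▸ hlt) hyz
          simp [ne_of_gt this]
        rw [List.filter_cons_of_pos (by simpa using hxk), hnil, if_pos hxk]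
        simp
      · rw [List.filter_cons_of_neg (by simpa using hxk), if_neg hxk]
    · rw [if_neg (by simpa using hlt)]
      have htail := (List.pairwise_cons.mp hys).2
      by_cases hyk : f y == k
      · rw [List.filter_cons_of_pos (by simpa using hyk), List.filter_cons_of_pos (by simpa using hyk),
          ih htail]
        split <;> simp
      · rw [List.filter_cons_of_neg (by simpa using hyk), List.filter_cons_of_neg (by simpa using hyk),
          ih htail]

lemma filter_foldl_insertBy {α : Type} (f : α → String) (k : String) (xs acc : List α)
    (hacc : acc.Pairwise (fun a b => f a ≤ f b)) :
    (xs.foldl (fun a x => PySem.List.insertBy (fun a b => decide (f a < f b)) x a) acc).filter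
        (fun y => f y == k)
      = acc.filter (fun y => f y == k) ++ xs.filter (fun y => f y == k) := by
  induction xs generalizing acc with
  | nil => simp
  | cons x xs ih =>
    rw [List.foldl_cons, ih _ (PySem.List.insertBy_pairwise_le f x acc hacc),
      filter_insertBy_key f k x acc hacc]
    by_cases hxk : f x == k
    · rw [if_pos hxk, List.filter_cons_of_pos (by simpa using hxk)]
      simp
    · rw [if_neg hxk, List.filter_cons_of_neg (by simpa using hxk)]

lemma filter_sorted_key {α : Type} (f : α → String) (k : String) (xs : List α) :
    (PySem.List.sorted xs f false).filter (fun y => f y == k) = xs.filter (fun y => f y == k) := by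
  rw [PySem.List.sorted_eq_foldl_insertBy]
  simpa using filter_foldl_insertBy f k xs [] (by simp)

-- a key of pvRuns l is a key occurring in l
lemma mem_keys_pvRuns (l : List (String × String)) (k : String) :
    k ∈ (pvRuns l).map (fun r => r.1) ↔ k ∈ l.map (fun p => p.2) := by
  induction l using pvRuns.induct with
  | case1 => simp [pvRuns]
  | case2 t k' rest ih =>
    rw [pvRuns]
    simp only [List.map_cons, List.mem_cons, ih]
    constructor
    · rintro (rfl | h)
      · exact .inl rfl
      · right
        rcases List.mem_map.mp h with ⟨p, hp, rfl⟩
        exact List.mem_map_of_mem ((List.dropWhile_sublist _).mem hp)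
    · rintro (rfl | h)
      · exact .inl rfl
      · rcases List.mem_map.mp h with ⟨p, hp, rfl⟩
        rw [← List.takeWhile_append_dropWhile (p := fun p => p.2 == k') (l := rest)] at hp
        rcases List.mem_append.mp hp with hp | hp
        · have h2 : p.2 = k' := by simpa using List.mem_takeWhile_imp hp
          exact .inl (h2 ▸ rfl)
        · exact .inr (List.mem_map_of_mem hp)

-- overwrite semantics of a fold of inserts, relative to an arbitrary start dict
lemma get?_foldl_insert (rs : List (String × List String)) (d : PySem.Dict String (List String)) (k : String) :
    (rs.foldl (fun d r => d.insert r.1 r.2) d).get? k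
      = if k ∈ rs.map (fun r => r.1)
        then (rs.foldl (fun d r => d.insert r.1 r.2) PySem.Dict.empty).get? k
        else d.get? k := by
  induction rs generalizing d with
  | nil => simp
  | cons r rs ih =>
    rw [List.foldl_cons, List.foldl_cons, ih, ih (PySem.Dict.empty.insert r.1 r.2)]
    by_cases hmem : k ∈ rs.map (fun r => r.1)
    · simp [hmem]
    · by_cases hk : k = r.1
      · subst hk
        simp [hmem, PySem.Dict.get?_insert_self]
      · simp [hmem, hk, PySem.Dict.get?_insert_of_ne _ _ hk]

-- the run dict of a key-sorted pair list looks up to the filtered members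
lemma getD_runs (l : List (String × String)) (hl : l.Pairwise (fun a b => a.2 ≤ b.2)) (k : String) :
    ((pvRuns l).foldl (fun d r => d.insert r.1 r.2)
        (PySem.Dict.empty : PySem.Dict String (List String))).getD k []
      = (l.filter (fun p => p.2 == k)).map (fun p => p.1) := by
  induction l using pvRuns.induct with
  | case1 => simp [pvRuns]
  | case2 t k' rest ih =>
    have hhead : ∀ p ∈ rest, k' ≤ p.2 := by
      intro p hp; exact (List.pairwise_cons.mp hl).1 p hp
    have htail : rest.Pairwise (fun a b => a.2 ≤ b.2) := (List.pairwise_cons.mp hl).2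
    set tw := rest.takeWhile (fun p => p.2 == k') with htw
    set dw := rest.dropWhile (fun p => p.2 == k') with hdw
    have hdwgt : ∀ q ∈ dw, k' < q.2 := by
      intro q hq
      cases hcons : dw with
      | nil => rw [hcons] at hq; cases hq
      | cons q0 dws =>
        have hq0false : (q0.2 == k') = false := by
          have := List.head?_dropWhile_not (fun p => p.2 == k') rest
          rw [← hdw, hcons] at this; simpa using this
        have hq0mem : q0 ∈ rest := (List.dropWhile_sublist _).mem (by rw [← hdw, hcons]; simp)
        have hq0ne : q0.2 ≠ k' := by simpa using hq0false
        have hq0 : k' < q0.2 := lt_of_le_of_ne (hhead q0 hq0mem) hq0ne.symm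
        have hdwpw : dw.Pairwise (fun a b => a.2 ≤ b.2) := htail.sublist (by rw [hdw]; exact List.dropWhile_sublist _)
        rw [hcons] at hq hdwpw
        rcases List.mem_cons.mp hq with rfl | hq
        · exact hq0
        · exact lt_of_lt_of_le hq0 ((List.pairwise_cons.mp hdwpw).1 q hq)
    have hdwpw : dw.Pairwise (fun a b => a.2 ≤ b.2) := htail.sublist (by rw [hdw]; exact List.dropWhile_sublist _)
    have hrest : tw ++ dw = rest := by rw [htw, hdw]; exact List.takeWhile_append_dropWhile
    have htwf : tw.filter (fun p => p.2 == k') = tw := by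
      rw [List.filter_eq_self]
      intro z hz; rw [htw] at hz
      exact List.mem_takeWhile_imp (p := fun p : String × String => p.2 == k') hz
    have htwnil : ∀ c, c ≠ k' → tw.filter (fun p => p.2 == c) = [] := by
      intro c hc
      rw [List.filter_eq_nil_iff]
      intro z hz
      have hzz : z.2 = k' := by
        rw [htw] at hz
        have := List.mem_takeWhile_imp (p := fun p : String × String => p.2 == k') hz; simpa using this
      simp [hzz]; exact fun h => hc (Eq.symm h)
    rw [pvRuns, List.foldl_cons, PySem.Dict.getD_eq_get?_getD, get?_foldl_insert]
    by_cases hmem : k ∈ (pvRuns dw).map (fun r => r.1)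
    · have hkdw : k ∈ dw.map (fun p => p.2) := (mem_keys_pvRuns dw k).mp hmem
      have hkgt : k' < k := by
        rcases List.mem_map.mp hkdw with ⟨q, hq, rfl⟩
        exact hdwgt q hq
      have hfr : rest.filter (fun p => p.2 == k) = dw.filter (fun p => p.2 == k) := by
        conv_lhs => rw [← hrest]
        rw [List.filter_append, htwnil k (by intro h; subst h; exact lt_irrefl _ hkgt), List.nil_append]
      rw [if_pos hmem, ← PySem.Dict.getD_eq_get?_getD, ih hdwpw,
        List.filter_cons_of_neg, hfr]
      simp
      intro h; subst h; exact lt_irrefl _ hkgt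
    · rw [if_neg hmem]
      have hkndw : k ∉ dw.map (fun p => p.2) := fun h => hmem ((mem_keys_pvRuns dw k).mpr h)
      have h2dw : dw.filter (fun p => p.2 == k) = [] := by
        rw [List.filter_eq_nil_iff]
        intro z hz hzk
        exact hkndw (List.mem_map.mpr ⟨z, hz, by simpa using hzk⟩)
      by_cases hk : k = k'
      · subst hk
        have hfr : rest.filter (fun p => p.2 == k) = tw := by
          conv_lhs => rw [← hrest]
          rw [List.filter_append, htwf, h2dw, List.append_nil]
        rw [PySem.Dict.get?_insert_self, Option.getD_some, List.filter_cons_of_pos (by simp),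
          hfr, List.map_cons, ← htw]
      · have hfr : rest.filter (fun p => p.2 == k) = [] := by
          conv_lhs => rw [← hrest]
          rw [List.filter_append, htwnil k hk, h2dw, List.nil_append]
        rw [PySem.Dict.get?_insert_of_ne _ _ hk, PySem.Dict.get?_empty, List.filter_cons_of_neg,
          hfr]
        · rfl
        · simp; exact fun h => hk (Eq.symm h)

theorem ports_eq (tools_list exempt_list : List String) :
    group_tools_by_parent tools_list exempt_list = group_tools_by_parent_alt tools_list exempt_list := by
  unfold group_tools_by_parent group_tools_by_parent_alt
  dsimp only
  have hfold : (fun (d : PySem.Dict String (List String)) (t : String) =>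
      if t ∈ exempt_list then d.modify t [] (fun v => v ++ [t])
      else d.modify ((PySem.Str.split₀ t).headD "") [] (fun v => v ++ [t]))
    = fun d t => d.modify (pvKeyB exempt_list t) [] (fun v => v ++ [t]) := by
    funext d t; unfold pvKeyB; split <;> rfl
  rw [hfold]
  set key := pvKeyB exempt_list with hkeydef
  set d0 := tools_list.foldl (fun d t => d.modify (key t) [] (fun v => v ++ [t]))
    (PySem.Dict.empty : PySem.Dict String (List String)) with hd0
  have hkeys0 : d0.keys = PySem.List.dedup (tools_list.map key) := by
    rw [hd0, PySem.Dict.keys_foldl_modify_key, PySem.List.dedup_eq_ofList,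
      PySem.Set.ofList_eq_foldl]
    rfl
  have hnd0 : d0.keys.Nodup := by
    rw [hd0]; exact PySem.Dict.nodup_keys_foldl_modify_key _ _ _ _ _ (by simp)
  have hgetD0 : ∀ c, d0.getD c [] = tools_list.filter (fun t => key t == c) := by
    intro c
    have : d0 = ((tools_list.map (fun t => (key t, t))).foldl
        (fun d p => d.modify p.1 [] (fun v => v ++ [p.2]))
        (PySem.Dict.empty : PySem.Dict String (List String))) := by
      rw [hd0, List.foldl_map]
    rw [this, PySem.Dict.getD_foldl_modify_append]
    simp [List.filter_map, Function.comp_def]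
  set d1 := if d0.contains "Git" then d0.modify "Git" [] (fun v => v ++ ["git-commit-signing"]) else d0 with hd1
  set d2 := if d1.contains "GitHub" then d1.modify "GitHub" [] (fun v => v ++ ["git-commit-signing"]) else d1 with hd2
  set d3 := if d2.contains "GitLab" then d2.modify "GitLab" [] (fun v => v ++ ["git-commit-signing"]) else d2 with hd3
  have hkeys3 : d3.keys = d0.keys := by
    rw [hd3, git_step_keys, hd2, git_step_keys, hd1, git_step_keys]
  have hnd3 : d3.keys.Nodup := by rw [hkeys3]; exact hnd0
  have hgetD3 : ∀ c ∈ d0.keys, d3.getD c []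
      = d0.getD c [] ++ (if c = "Git" ∨ c = "GitHub" ∨ c = "GitLab" then ["git-commit-signing"] else []) := by
    intro c hc
    have hcont : d0.contains c = true := by
      rw [PySem.Dict.contains_eq_decide_mem_keys]; simpa using hc
    have h1c : ∀ x, d1.contains x = d0.contains x := fun x => by rw [hd1, git_step_contains]
    have h2c : ∀ x, d2.contains x = d0.contains x := fun x => by rw [hd2, git_step_contains, h1c]
    rw [hd3, git_step_getD, h2c, hd2, git_step_getD, h1c, hd1, git_step_getD]
    by_cases hg1 : c = "Git"
    · subst hg1; simp [hcont]
    · by_cases hg2 : c = "GitHub"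
      · subst hg2; simp [hcont]
      · by_cases hg3 : c = "GitLab"
        · subst hg3; simp [hcont]
        · simp [hg1, hg2, hg3]
  rw [PySem.Dict.items_eq_map_keys d3 hnd3 [], List.map_map, hkeys3, hkeys0]
  have hzip : ∀ c, (((tools_list.zip (tools_list.map key)).filter (fun p => p.2 == c)).map (fun p => p.1))
      = tools_list.filter (fun t => key t == c) := by
    intro c
    have : ∀ (l : List String), l.zip (l.map key) = l.map (fun t => (t, key t)) := by
      intro l; induction l with
      | nil => rfl
      | cons a t ih => simp [ih]
    rw [this]
    rw [List.filter_map, List.map_map]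
    simp [Function.comp_def]
  have hB : ∀ c, (((pvRuns (PySem.List.sorted (tools_list.zip (tools_list.map key)) (fun p => p.2) false)).foldl
        (fun d r => d.insert r.1 r.2) (PySem.Dict.empty : PySem.Dict String (List String))).getD c [])
      = tools_list.filter (fun t => key t == c) := by
    intro c
    rw [getD_runs _ (by
        have := PySem.List.sorted_pairwise (tools_list.zip (tools_list.map key)) (fun p => p.2)
        exact this) c]
    rw [show (PySem.List.sorted (tools_list.zip (tools_list.map key)) (fun p => p.2) false).filter
          (fun p => p.2 == c)
        = (tools_list.zip (tools_list.map key)).filter (fun p => p.2 == c) from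
      filter_sorted_key (fun p : String × String => p.2) c _]
    exact hzip c
  apply List.map_congr_left
  intro k hk
  have hk0 : k ∈ d0.keys := by rw [hkeys0]; exact hk
  simp only [Function.comp_apply]
  rw [hgetD3 k hk0, hgetD0, hB]
  by_cases hg : k = "Git" ∨ k = "GitHub" ∨ k = "GitLab"
  · rw [if_pos hg, if_pos hg]
    congr 1
    rw [PySem.Set.ofList_eq_foldl, PySem.Set.ofList_eq_foldl, List.foldl_append]
    rfl
  · rw [if_neg hg, if_neg hg]; simp

-- ===== VERDICT (by name: the statement is the Claim_ definition above) =====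
theorem group_tools_by_parent_spec : Claim_equal_group_tools_by_parent := by
  intro tools_list exempt_list _ _
  exact ports_eq tools_list exempt_list
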